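-- pv_equiv track=rewrite | github.com/HugeChaos/DivisionPropertyForLargeSbox | ITUbee/ITUbee_integral_distinguisher.py | get_b_search_space
-- ===== SOURCE A (Python) =====
-- import copy
--
-- def weight_select1(l1, l2, l3, len1):
--     if len(l3) == len1:
--         l2.append(l3)
--         return l2
--     elif len(l1) == 0:
--         return l2
--     else:
--         l2p = []
--         for i in range(0, len(l1)):
--             l3.append(l1[i])
--             l2q = weight_select1(copy.deepcopy(l1[(i+1):]), copy.deepcopy(l2), copy.deepcopy(l3), len1)
--             l2p += copy.deepcopy(l2q)
--             l3.remove(l1[i])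
--         return l2p
--
-- def weight_select(len1):
--     l11 = [0, 1, 2, 3, 4, 5, 6, 7]
--     l12 = []
--     l13 = []
--     l14 = weight_select1(l11, l12, l13, len1)
--     return l14
--
-- def get_b_search_space(len1):
--     vec = weight_select(len1)
--     b_search_space = list()
--     for i in range(0, 10):
--         for vec1 in vec:
--             bi = [0 for ii in range(0, 80)]
--             for kk in range(0, 80):
--                 if kk // 8 != i:
--                     bi[kk] = 1
--             for vec11 in vec1:
--                 bi[i * 8 + vec11] = 1
--             b_search_space.append(copy.deepcopy(bi))
--     return b_search_space
-- ===== SOURCE B (Python) =====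
-- def get_b_search_space(len1):
--     # enumerate the 8-bit block patterns directly as bitmasks, descending mask order
--     # (= A's lexicographic subset order with position 0 as the most significant bit)
--     pats = [[(m >> (7 - p)) & 1 for p in range(8)]
--             for m in range(255, -1, -1)
--             if sum((m >> b) & 1 for b in range(8)) == len1]
--     return [[1] * (8 * i) + pat + [1] * (72 - 8 * i)
--             for i in range(10) for pat in pats]
-- ===== Notes on version B (the rewrite author's own statement) =====
-- stated objective: alternative
-- what changed: Replaces A's deepcopy-heavy recursive subset backtracking and its flat per-position scan with floor-division tests by a bitmask enumeration: scan all byte-sized masks in descending order (exactly A's lexicographic subset order with position zero as most significant bit), keep those whose popcount equals len1, extract each pattern by bit shifts, and assemble every output row as a three-piece concatenation of an all-ones prefix, the pattern block and an all-ones suffix; an invalid len1 matches no mask and hence yields the empty list as A does.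
import Mathlib
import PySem

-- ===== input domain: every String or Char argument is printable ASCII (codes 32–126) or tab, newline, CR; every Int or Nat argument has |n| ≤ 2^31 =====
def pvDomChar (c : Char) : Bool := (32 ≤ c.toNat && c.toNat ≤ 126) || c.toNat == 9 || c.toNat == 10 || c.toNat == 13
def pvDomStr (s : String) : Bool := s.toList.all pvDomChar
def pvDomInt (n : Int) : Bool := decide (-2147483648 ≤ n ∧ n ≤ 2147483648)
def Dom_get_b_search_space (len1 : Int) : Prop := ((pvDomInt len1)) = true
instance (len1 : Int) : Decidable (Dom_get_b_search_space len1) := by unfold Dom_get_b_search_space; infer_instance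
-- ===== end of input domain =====

-- B replaces A's deepcopy-heavy recursive subset backtracking and flat 80-position scan by a
-- descending bitmask scan (popcount filter) plus rows built as three-piece concatenations.

-- ===== PORT A =====
-- loop body of weight_select1's for-loop; f is the recursive call with l2 and len1 fixed
def ws1Step (f : List Int → List Int → List (List Int)) (l1 : List Int)
    (st : List (List Int) × List Int) (i : Int) : List (List Int) × List Int :=
  let x := PySem.List.pyGetD l1 i 0            -- l1[i], i ∈ range(len(l1)): always in range
  let l3' := st.2 ++ [x]                       -- l3.append(l1[i])
  let l2q := f (PySem.List.slice l1 (some (i+1)) none) l3'   -- weight_select1(l1[i+1:], l2, l3, len1)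
  (st.1 ++ l2q, (PySem.List.remove? l3' x).getD l3')         -- l2p += l2q; l3.remove(l1[i]) (x ∈ l3', so remove? is some)

-- weight_select1; fuel is a totality guard only: every call shrinks l1, so fuel 9 suffices from l1 of length 8
def weightSelect1 : Nat → List Int → List (List Int) → List Int → Int → List (List Int)
  | 0, _, _, _, _ => []
  | fuel+1, l1, l2, l3, len1 =>
    if (l3.length : Int) = len1 then l2 ++ [l3]
    else if l1.length = 0 then l2
    else ((PySem.List.pyRange 0 (l1.length : Int) 1).foldl
            (ws1Step (fun l1' l3' => weightSelect1 fuel l1' l2 l3' len1) l1)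
            (([] : List (List Int)), l3)).1

def weightSelect (len1 : Int) : List (List Int) :=
  weightSelect1 9 [0, 1, 2, 3, 4, 5, 6, 7] [] [] len1

-- bi = [0]*80; set 1 outside block i; then 1 at i*8 + vec11 for vec11 in vec1
def buildRow (i : Int) (vec1 : List Int) : List Int :=
  let bi0 := (PySem.List.pyRange 0 80 1).map (fun _ => (0 : Int))
  let bi1 := (PySem.List.pyRange 0 80 1).foldl
      (fun bi kk => if PySem.Int.floordiv kk 8 ≠ i then PySem.List.pySetD bi kk 1 else bi) bi0
  vec1.foldl (fun bi v => PySem.List.pySetD bi (i * 8 + v) 1) bi1   -- indices i*8+v ∈ [0,80): in range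

def bLoop (vec : List (List Int)) : List (List Int) :=
  (PySem.List.pyRange 0 10 1).foldl
    (fun bss i => vec.foldl (fun bss vec1 => bss ++ [buildRow i vec1]) bss) []

def get_b_search_space (len1 : Int) : List (List Int) :=
  bLoop (weightSelect len1)

-- ===== PORT B =====
-- sum((m >> b) & 1 for b in range(8)); for any int, m >> b = floordiv m 2^b and & 1 = mod 2 (exact)
def pcount (m : Int) : Int :=
  ((List.range 8).map (fun b => PySem.Int.mod (PySem.Int.floordiv m ((2:Int)^b)) 2)).sum

-- [(m >> (7 - p)) & 1 for p in range(8)]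
def patOf (m : Int) : List Int :=
  (List.range 8).map (fun p => PySem.Int.mod (PySem.Int.floordiv m ((2:Int)^(7-p))) 2)

-- pats = [... for m in range(255, -1, -1) if sum(...) == len1]
def altPats (len1 : Int) : List (List Int) :=
  ((PySem.List.pyRange 255 (-1) (-1)).filter (fun m => pcount m == len1)).map patOf

-- [[1]*(8*i) + pat + [1]*(72-8*i) for i in range(10) for pat in pats]
def get_b_search_space_alt (len1 : Int) : List (List Int) :=
  (PySem.List.pyRange 0 10 1).flatMap (fun i =>
    (altPats len1).map (fun pat =>
      List.replicate (8*i).toNat 1 ++ pat ++ List.replicate (72 - 8*i).toNat 1))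

-- ===== PRECONDITION & SPEC =====
def Spec_get_b_search_space (len1 : Int) (out : List (List Int)) : Prop := out = get_b_search_space_alt len1
instance (len1 : Int) (out : List (List Int)) : Decidable (Spec_get_b_search_space len1 out) := by unfold Spec_get_b_search_space; infer_instance

-- ===== CLAIM (what is proved, stated in full; the proofs are below) =====
def Claim_equal_get_b_search_space : Prop := ∀ (len1 : Int), Dom_get_b_search_space len1 → Spec_get_b_search_space len1 (get_b_search_space len1)

-- ===== LEMMAS AND PROOFS =====

-- characteristic 0/1 vector of a subset of [0,8)
def charvec (r : List Int) : List Int :=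
  (List.range 8).map (fun (p : Nat) => if (p : Int) ∈ r then (1 : Int) else 0)

theorem foldl_ws1Step_nil (f : List Int → List Int → List (List Int)) (l1 : List Int)
    (len1 : Int) (hl1 : 1 ≤ l1.length)
    (hf : ∀ l1' l3', (len1 < (l3'.length : Int) ∨ (l3'.length : Int) + l1'.length < len1) →
      f l1' l3' = []) :
    ∀ (idxs : List Int), (∀ i ∈ idxs, 0 ≤ i) →
    ∀ (acc : List (List Int)) (l3c : List Int),
      (len1 < (l3c.length : Int) ∨ (l3c.length : Int) + (l1.length : Int) < len1) →
      (idxs.foldl (ws1Step f l1) (acc, l3c)).1 = acc := by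
  intro idxs
  induction idxs with
  | nil => intro _ acc l3c _; rfl
  | cons i rest ih =>
    intro hpos acc l3c hlen
    have hi : 0 ≤ i := hpos i (by simp)
    have hslice : PySem.List.slice l1 (some (i+1)) none = l1.drop (i+1).toNat :=
      PySem.List.slice_from l1 (by omega)
    have hdroplen : (l1.drop (i+1).toNat).length ≤ l1.length - 1 := by
      simp [List.length_drop]; omega
    set x := PySem.List.pyGetD l1 i 0 with hx
    have hmem : x ∈ l3c ++ [x] := by simp
    have hrem : ((PySem.List.remove? (l3c ++ [x]) x).getD (l3c ++ [x])).length = l3c.length := by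
      rw [PySem.List.remove?_eq_some_erase (l3c ++ [x]) x hmem]
      simp [List.length_erase_of_mem hmem]
    have hrec : f (PySem.List.slice l1 (some (i+1)) none) (l3c ++ [x]) = [] := by
      apply hf
      rw [hslice]
      simp only [List.length_append, List.length_cons, List.length_nil]
      omega
    have hstep : ws1Step f l1 (acc, l3c) i
        = (acc, (PySem.List.remove? (l3c ++ [x]) x).getD (l3c ++ [x])) := by
      simp [ws1Step, hrec, ← hx]
    rw [List.foldl_cons, hstep]
    apply ih (fun j hj => hpos j (by simp [hj])) acc
    omega

theorem ws1_nil (len1 : Int) : ∀ (fuel : Nat) (l1 l3 : List Int),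
    (len1 < (l3.length : Int) ∨ (l3.length : Int) + l1.length < len1) →
    weightSelect1 fuel l1 [] l3 len1 = [] := by
  intro fuel
  induction fuel with
  | zero => intro l1 l3 _; rfl
  | succ fuel ih =>
    intro l1 l3 hlen
    rw [weightSelect1]
    rw [if_neg (by omega)]
    by_cases h0 : l1.length = 0
    · rw [if_pos h0]
    · rw [if_neg h0]
      apply foldl_ws1Step_nil _ _ _ (by omega)
      · intro l1' l3' h'; exact ih l1' l3' h'
      · intro i hi
        have := (PySem.List.mem_pyRange_one).1 hi
        omega
      · exact hlen

theorem a_nil (len1 : Int) (h : len1 < 0 ∨ 8 < len1) : get_b_search_space len1 = [] := by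
  have hv : weightSelect len1 = [] := by
    apply ws1_nil
    simp; omega
  rw [get_b_search_space, hv]
  rfl

set_option maxRecDepth 100000 in
theorem pcount_bounds : ∀ m ∈ PySem.List.pyRange 255 (-1) (-1), 0 ≤ pcount m ∧ pcount m ≤ 8 := by
  decide

theorem b_nil (len1 : Int) (h : len1 < 0 ∨ 8 < len1) : get_b_search_space_alt len1 = [] := by
  have hf : (PySem.List.pyRange 255 (-1) (-1)).filter (fun m => pcount m == len1) = [] := by
    apply List.filter_eq_nil_iff.2
    intro m hm
    have := pcount_bounds m hm
    simp only [beq_iff_eq]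
    omega
  simp [get_b_search_space_alt, altPats, hf]

theorem patFold : ∀ (r : List Int), (∀ v ∈ r, 0 ≤ v ∧ v < 8) → ∀ (b : List Int), b.length = 8 →
    r.foldl (fun b v => PySem.List.pySetD b v 1) b
      = (List.range 8).map (fun (p : Nat) => if (p : Int) ∈ r then (1 : Int) else b.getD p 0) := by
  intro r
  induction r with
  | nil =>
    intro _ b hb
    simp only [List.foldl_nil, List.not_mem_nil, if_false]
    apply List.ext_getElem
    · simp [hb]
    · intro p h1 h2
      simp only [List.length_map, List.length_range] at h2
      simp [List.getD, List.getElem?_eq_getElem h1]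
  | cons v rest ih =>
    intro hr b hb
    have hv := hr v (by simp)
    rw [List.foldl_cons, PySem.List.pySetD_of_nonneg b 1 hv.1,
      ih (fun w hw => hr w (by simp [hw])) _ (by simp [hb])]
    apply List.map_congr_left
    intro p hp
    have hp8 : p < 8 := List.mem_range.1 hp
    by_cases h1 : (p : Int) ∈ rest
    · simp [h1]
    · by_cases h2 : (p : Int) = v
      · have h3 : v.toNat = p := by omega
        simp [h2, h3, List.getD, hb, hp8]
      · have h3 : v.toNat ≠ p := by omega
        have h4 : ¬ (p : Int) ∈ v :: rest := by simp [h1]; exact fun h => h2 h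
        simp [h1, h4, List.getD, h3]

theorem setBlock (m : Int) (pre post : List Int) (hm : m = (pre.length : Int)) :
    ∀ (r : List Int), (∀ v ∈ r, 0 ≤ v ∧ v < 8) → ∀ (b : List Int), b.length = 8 →
    r.foldl (fun bi v => PySem.List.pySetD bi (m + v) 1) (pre ++ b ++ post)
      = pre ++ r.foldl (fun b v => PySem.List.pySetD b v 1) b ++ post := by
  intro r
  induction r with
  | nil => intro _ b _; rfl
  | cons v rest ih =>
    intro hr b hb
    have hv := hr v (by simp)
    have h1 : PySem.List.pySetD (pre ++ b ++ post) (m + v) 1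
        = pre ++ PySem.List.pySetD b v 1 ++ post := by
      rw [PySem.List.pySetD_of_nonneg _ 1 (by omega), PySem.List.pySetD_of_nonneg _ 1 hv.1]
      have ht : (m + v).toNat = pre.length + v.toNat := by omega
      rw [ht, List.append_assoc, List.set_append_right _ _ (by omega),
        List.append_assoc, Nat.add_sub_cancel_left,
        List.set_append_left _ _ (by omega)]
    rw [List.foldl_cons, List.foldl_cons, h1,
      ih (fun w hw => hr w (by simp [hw])) _ (by simp [PySem.List.pySetD_of_nonneg b 1 hv.1, hb])]

set_option maxRecDepth 10000 in
theorem bi1_eq (i : Int) (iN : Nat) (hi : i = (iN : Int)) (h10 : iN < 10) :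
    (PySem.List.pyRange 0 80 1).foldl
      (fun bi kk => if PySem.Int.floordiv kk 8 ≠ i then PySem.List.pySetD bi kk 1 else bi)
      ((PySem.List.pyRange 0 80 1).map (fun _ => (0 : Int)))
    = List.replicate (8*iN) 1 ++ List.replicate 8 0 ++ List.replicate (72 - 8*iN) 1 := by
  subst hi
  interval_cases iN <;> rfl

theorem rowEq (i : Int) (iN : Nat) (hi : i = (iN : Int)) (h10 : iN < 10)
    (r : List Int) (hr : ∀ v ∈ r, 0 ≤ v ∧ v < 8) :
    buildRow i r
      = List.replicate (8*i).toNat 1 ++ charvec r ++ List.replicate (72 - 8*i).toNat 1 := by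
  rw [buildRow]
  rw [bi1_eq i iN hi h10]
  have hm : i * 8 = ((List.replicate (8*iN) (1:Int)).length : Int) := by
    simp [hi]; ring
  rw [setBlock (i*8) _ _ hm r hr _ (by simp)]
  rw [patFold r hr _ (by simp)]
  have h1 : (8*i).toNat = 8*iN := by omega
  have h2 : (72 - 8*i).toNat = 72 - 8*iN := by omega
  rw [h1, h2]
  have hc : (List.range 8).map
      (fun (p : Nat) => if (p : Int) ∈ r then (1 : Int) else (List.replicate 8 (0 : Int)).getD p 0)
      = charvec r := by
    unfold charvec
    apply List.map_congr_left
    intro p hp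
    have hp8 := List.mem_range.1 hp
    by_cases h : (p : Int) ∈ r
    · simp [h]
    · simp only [h, if_false]
      interval_cases p <;> rfl
  rw [hc]

theorem main_eq (vec : List (List Int)) (h : ∀ r ∈ vec, ∀ v ∈ r, 0 ≤ v ∧ v < 8) :
    bLoop vec = (PySem.List.pyRange 0 10 1).flatMap (fun i =>
      (vec.map charvec).map (fun pat =>
        List.replicate (8*i).toNat 1 ++ pat ++ List.replicate (72 - 8*i).toNat 1)) := by
  have hmap : ∀ (iI : Int) (iN : Nat), iI = (iN : Int) → iN < 10 →
      vec.map (buildRow iI)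
        = (vec.map charvec).map (fun pat =>
            List.replicate (8*iI).toNat 1 ++ pat ++ List.replicate (72 - 8*iI).toNat 1) := by
    intro iI iN hi h10
    rw [List.map_map]
    apply List.map_congr_left
    intro r hr
    exact rowEq iI iN hi h10 r (h r hr)
  rw [bLoop, show PySem.List.pyRange 0 10 1 = [0,1,2,3,4,5,6,7,8,9] from rfl]
  simp only [List.foldl_cons, List.foldl_nil, List.flatMap_cons, List.flatMap_nil,
    PySem.List.foldl_append_singleton_eq_map]
  rw [hmap 0 0 (by norm_num) (by norm_num), hmap 1 1 (by norm_num) (by norm_num),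
    hmap 2 2 (by norm_num) (by norm_num), hmap 3 3 (by norm_num) (by norm_num),
    hmap 4 4 (by norm_num) (by norm_num), hmap 5 5 (by norm_num) (by norm_num),
    hmap 6 6 (by norm_num) (by norm_num), hmap 7 7 (by norm_num) (by norm_num),
    hmap 8 8 (by norm_num) (by norm_num), hmap 9 9 (by norm_num) (by norm_num)]
  simp [List.append_assoc]

theorem inrange (len1 : Int)
    (hp : altPats len1 = (weightSelect len1).map charvec)
    (hb : ∀ r ∈ weightSelect len1, ∀ v ∈ r, 0 ≤ v ∧ v < 8) :
    get_b_search_space len1 = get_b_search_space_alt len1 := by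
  rw [get_b_search_space, main_eq _ hb, get_b_search_space_alt, hp]

-- ===== VERDICT (by name: the statement is the Claim_ definition above) =====
set_option maxRecDepth 10000 in
theorem get_b_search_space_spec : Claim_equal_get_b_search_space := by
  intro len1 _
  unfold Spec_get_b_search_space
  by_cases h : 0 ≤ len1 ∧ len1 ≤ 8
  · obtain ⟨h1, h2⟩ := h
    interval_cases len1 <;> exact inrange _ (by decide) (by decide)
  · rw [a_nil len1 (by omega), b_nil len1 (by omega)]
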